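-- pv_equiv track=rewrite | github.com/KimHeeSu1203/studyAlgo_Python | pro42840.py | solution
-- ===== SOURCE A (Python) =====
-- def solution(answers):
--   answer = []
--   kk = []
--   students = [[1,2,3,4,5],[2,1,2,3,2,4,2,5],[3,3,1,1,2,2,4,4,5,5]]
--
--
--   for student in students:
--     tmp_student = student*(len(answers)//len(student)+1)
--     tmp_right = 0
--     for i in range(len(answers)):
--       if answers[i] == tmp_student[i]:
--         tmp_right += 1
--
--     kk.append(tmp_right)
--   maxAnswer = max(kk)
--   for i in range(len(students)):
--     if maxAnswer == kk[i]:
--         answer.append(i+1)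
--   return answer
-- ===== SOURCE B (Python) =====
-- def solution(answers):
--     patterns = [[1, 2, 3, 4, 5], [2, 1, 2, 3, 2, 4, 2, 5], [3, 3, 1, 1, 2, 2, 4, 4, 5, 5]]
--     # All three patterns repeat with period 40 = lcm(5, 8, 10); tile each once to 40 slots.
--     tables = [p * (40 // len(p)) for p in patterns]
--     # Histogram of (position mod 40, answer) pairs: one pass over the input.
--     hist = {}
--     for i, a in enumerate(answers):
--         k = (i % 40, a)
--         hist[k] = hist.get(k, 0) + 1
--     # Each score is 40 histogram lookups, no second scan of the answers.
--     scores = [sum(hist.get((r, t[r]), 0) for r in range(40)) for t in tables]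
--     best = max(scores)
--     return [i for i, s in enumerate(scores, 1) if s == best]
-- ===== Notes on version B (the rewrite author's own statement) =====
-- stated objective: alternative
-- what changed: Instead of scanning the answers once per student against tiled pattern copies, B builds a histogram keyed by (index mod 40, answer) in a single pass (40 = lcm of the three pattern periods) and then computes each student's score as 40 dictionary lookups against that student's period-40 table, so the answers are never compared against a pattern directly.
import Mathlib
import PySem

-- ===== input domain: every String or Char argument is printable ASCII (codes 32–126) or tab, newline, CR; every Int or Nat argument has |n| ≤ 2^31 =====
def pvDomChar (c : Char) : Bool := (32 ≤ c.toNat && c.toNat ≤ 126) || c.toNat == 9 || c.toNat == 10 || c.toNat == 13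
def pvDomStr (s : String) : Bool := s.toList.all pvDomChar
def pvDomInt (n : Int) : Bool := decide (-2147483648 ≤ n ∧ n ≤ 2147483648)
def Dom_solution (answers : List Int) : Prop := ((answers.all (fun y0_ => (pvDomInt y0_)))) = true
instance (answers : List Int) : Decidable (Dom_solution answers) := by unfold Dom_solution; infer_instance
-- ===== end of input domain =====

-- B replaces A's per-student scans over tiled pattern copies with one histogram of
-- (index mod 40, answer) pairs plus 40 table lookups per student (objective: alternative).

set_option maxRecDepth 4000


-- ===== PORT A =====
-- literal port of Source A; all list indexings (answers[i], tmp_student[i], kk[i]) are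
-- provably in range on every input, so pyGetD with an unused default is exact, and
-- kk always has 3 elements so max(kk) never raises.
def solution (answers : List Int) : List Int :=
  let students : List (List Int) := [[1,2,3,4,5],[2,1,2,3,2,4,2,5],[3,3,1,1,2,2,4,4,5,5]]
  let kk : List Int := students.foldl (fun kk student =>
    let tmp_student := PySem.List.pyRepeat student
      (PySem.Int.floordiv (answers.length : Int) (student.length : Int) + 1)
    let tmp_right : Int := (PySem.List.pyRange 0 (answers.length : Int) 1).foldl
      (fun acc i =>
        if PySem.List.pyGetD answers i 0 = PySem.List.pyGetD tmp_student i 0 then acc + 1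
        else acc) 0
    kk ++ [tmp_right]) []
  let maxAnswer : Int := (PySem.List.max? kk (fun x => x)).getD 0
  (PySem.List.pyRange 0 (students.length : Int) 1).foldl
    (fun answer i =>
      if maxAnswer = PySem.List.pyGetD kk i 0 then answer ++ [i + 1] else answer) []

-- ===== PORT B =====
-- literal port of Source B: one histogram pass keyed by (i % 40, answer), then each score
-- is a sum of 40 dictionary lookups against that student's period-40 table.
def solution_alt (answers : List Int) : List Int :=
  let patterns : List (List Int) := [[1,2,3,4,5],[2,1,2,3,2,4,2,5],[3,3,1,1,2,2,4,4,5,5]]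
  let tables : List (List Int) := patterns.map (fun p =>
    PySem.List.pyRepeat p (PySem.Int.floordiv 40 (p.length : Int)))
  let hist : PySem.Dict (Int × Int) Int := (PySem.List.enumerate answers 0).foldl
    (fun d ia =>
      let k : Int × Int := (PySem.Int.mod ia.1 40, ia.2)
      d.insert k (d.getD k 0 + 1)) PySem.Dict.empty
  let scores : List Int := tables.map (fun t =>
    ((PySem.List.pyRange 0 40 1).map (fun r =>
      hist.getD (r, PySem.List.pyGetD t r 0) 0)).sum)
  let best : Int := (PySem.List.max? scores (fun x => x)).getD 0
  (PySem.List.enumerate scores 1).foldl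
    (fun ans is => if is.2 = best then ans ++ [is.1] else ans) []

-- ===== PRECONDITION & SPEC =====
def Spec_solution (answers : List Int) (out : List Int) : Prop := out = solution_alt answers
instance (answers : List Int) (out : List Int) : Decidable (Spec_solution answers out) := by unfold Spec_solution; infer_instance

-- ===== CLAIM (what is proved, stated in full; the proofs are below) =====
def Claim_equal_solution : Prop := ∀ (answers : List Int), Dom_solution answers → Spec_solution answers (solution answers)

-- ===== LEMMAS AND PROOFS =====

-- indexing the m-fold repetition of p is indexing p modulo its length
lemma repeat_getD (p : List Int) (m k : Nat) (h : k < m * p.length) :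
    (List.replicate m p).flatten.getD k 0 = p.getD (k % p.length) 0 := by
  induction m generalizing k with
  | zero => omega
  | succ m ih =>
    have hflat : (List.replicate (m + 1) p).flatten = p ++ (List.replicate m p).flatten := by
      simp [List.replicate_succ]
    rw [hflat]
    by_cases hk : k < p.length
    · rw [List.getD_append _ _ _ _ hk, Nat.mod_eq_of_lt hk]
    · rw [List.getD_append_right _ _ _ _ (by omega), Nat.mod_eq_sub_mod (by omega)]
      have hsm : (m + 1) * p.length = m * p.length + p.length := by ring
      exact ih (k - p.length) (by omega)

-- A's repeated-pattern lookup equals the lookup in p at the index taken modulo its length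
lemma pyRepeat_getD (p : List Int) (hp : p ≠ []) (n : Nat) (i : Int)
    (h0 : 0 ≤ i) (h1 : i < (n : Int)) :
    PySem.List.pyGetD
      (PySem.List.pyRepeat p (PySem.Int.floordiv (n : Int) (p.length : Int) + 1)) i 0
      = PySem.List.pyGetD p (PySem.Int.mod i (p.length : Int)) 0 := by
  have hL : 0 < p.length := List.length_pos_iff.mpr hp
  lift i to ℕ using h0 with k
  have hk : k < n := by exact_mod_cast h1
  have hfd : PySem.Int.floordiv (n : Int) (p.length : Int) + 1 = ((n / p.length + 1 : Nat) : Int) := by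
    show Int.fdiv (n : Int) (p.length : Int) + 1 = ((n / p.length + 1 : Nat) : Int)
    rw [Int.fdiv_eq_ediv_of_nonneg _ (by positivity)]
    push_cast
    rfl
  have hmod : PySem.Int.mod (k : Int) (p.length : Int) = ((k % p.length : Nat) : Int) := by
    show Int.fmod (k : Int) (p.length : Int) = ((k % p.length : Nat) : Int)
    rw [Int.fmod_eq_emod_of_nonneg _ (by positivity)]
    push_cast
    rfl
  rw [hfd, hmod, PySem.List.pyGetD_natCast, PySem.List.pyGetD_natCast]
  have hrep : PySem.List.pyRepeat p ((n / p.length + 1 : Nat) : Int)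
      = (List.replicate (n / p.length + 1) p).flatten := by
    simp only [PySem.List.pyRepeat, Int.toNat_natCast]
  rw [hrep]
  apply repeat_getD
  have hdm := Nat.div_add_mod n p.length
  have hm : n % p.length < p.length := Nat.mod_lt _ hL
  have hc : (n / p.length + 1) * p.length = p.length * (n / p.length) + p.length := by ring
  omega

-- A's per-pattern counting pass counts the indices whose answer matches p at i mod len(p)
lemma cnt_eq (p : List Int) (hp : p ≠ []) (xs : List Int) :
    (PySem.List.pyRange 0 (xs.length : Int) 1).foldl
      (fun acc i =>
        if PySem.List.pyGetD xs i 0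
            = PySem.List.pyGetD
                (PySem.List.pyRepeat p
                  (PySem.Int.floordiv (xs.length : Int) (p.length : Int) + 1)) i 0
        then acc + 1 else acc) (0 : Int)
    = ((PySem.List.enumerate xs 0).countP
        (fun ia => decide (ia.2 = PySem.List.pyGetD p (PySem.Int.mod ia.1 (p.length : Int)) 0)) : Int) := by
  have h1 : (PySem.List.pyRange 0 (xs.length : Int) 1).foldl
      (fun acc i =>
        if PySem.List.pyGetD xs i 0
            = PySem.List.pyGetD
                (PySem.List.pyRepeat p
                  (PySem.Int.floordiv (xs.length : Int) (p.length : Int) + 1)) i 0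
        then acc + 1 else acc) (0 : Int)
      = (PySem.List.enumerate xs 0).foldl
      (fun acc ia =>
        if ia.2 = PySem.List.pyGetD p (PySem.Int.mod ia.1 (p.length : Int)) 0 then acc + 1
        else acc) (0 : Int) := by
    rw [PySem.List.enumerate_eq_map_pyRange (d := 0), List.foldl_map]
    simp only [PySem.List.len_eq]
    apply PySem.List.foldl_congr_mem
    intro acc i hi
    rw [PySem.List.mem_pyRange_one] at hi
    rw [pyRepeat_getD p hp xs.length i hi.1 hi.2]
  rw [h1, PySem.List.foldl_ite_add_one]
  ring

-- a sum over a nodup list of an indicator that fires only at a ∈ rs collapses to c a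
lemma sum_ite_eq_single (rs : List Int) (hnd : rs.Nodup) (a : Int) (ha : a ∈ rs) (c : Int → Int) :
    (rs.map (fun r => if r = a then c r else 0)).sum = c a := by
  induction rs with
  | nil => cases ha
  | cons x t ih =>
    rcases List.mem_cons.mp ha with h | h
    · subst h
      have hxa : a ∉ t := (List.nodup_cons.mp hnd).1
      have : (t.map (fun r => if r = a then c r else 0)).sum = 0 := by
        rw [List.sum_eq_zero]
        intro y hy
        rcases List.mem_map.mp hy with ⟨r, hr, hrw⟩
        have : r ≠ a := fun he => hxa (he ▸ hr)
        simp [this] at hrw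
        omega
      simp [this]
    · have hxa : x ≠ a := fun he => (List.nodup_cons.mp hnd).1 (he ▸ h)
      simp [hxa, ih (List.nodup_cons.mp hnd).2 h]

-- B's 40 histogram lookups sum to the number of pairs whose answer matches v at i mod 40
lemma sum_count_keys (l : List (Int × Int)) (v : Int → Int) :
    ((PySem.List.pyRange 0 40 1).map (fun r =>
      ((l.map (fun ia => (PySem.Int.mod ia.1 40, ia.2))).count (r, v r) : Int))).sum
    = (l.countP (fun ia => decide (ia.2 = v (PySem.Int.mod ia.1 40))) : Int) := by
  induction l with
  | nil => simp
  | cons x t ih =>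
    have hkey : PySem.Int.mod x.1 40 ∈ PySem.List.pyRange 0 40 1 := by
      rw [PySem.List.mem_pyRange_one]
      exact ⟨PySem.Int.mod_nonneg _ (by norm_num), PySem.Int.mod_lt _ (by norm_num)⟩
    have hnd : (PySem.List.pyRange 0 40 1).Nodup := by decide
    have hsplit : ∀ r : Int,
        (((x :: t).map (fun ia => (PySem.Int.mod ia.1 40, ia.2))).count (r, v r) : Int)
        = ((t.map (fun ia => (PySem.Int.mod ia.1 40, ia.2))).count (r, v r) : Int)
          + (if r = PySem.Int.mod x.1 40 then (if x.2 = v r then 1 else 0) else 0) := by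
      intro r
      rw [List.map_cons, List.count_cons]
      push_cast
      congr 1
      have hiff : ((PySem.Int.mod x.1 40, x.2) = (r, v r)) ↔ (r = PySem.Int.mod x.1 40 ∧ x.2 = v r) := by
        simp only [Prod.mk.injEq]
        constructor
        · rintro ⟨h1, h2⟩; exact ⟨h1.symm, h1 ▸ h2⟩
        · rintro ⟨h1, h2⟩; exact ⟨h1.symm, h1 ▸ h2⟩
      simp only [beq_iff_eq, hiff]
      by_cases h1 : r = PySem.Int.mod x.1 40
      · by_cases h2 : x.2 = v r
        · simp only [h1, h2, and_self, if_true]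
        · simp only [h2, and_false, if_false, if_pos h1]
      · simp only [if_neg h1, if_neg (fun h : r = _ ∧ _ => h1 h.1)]
    have hmapeq : ((PySem.List.pyRange 0 40 1).map (fun r =>
        (((x :: t).map (fun ia => (PySem.Int.mod ia.1 40, ia.2))).count (r, v r) : Int)))
        = ((PySem.List.pyRange 0 40 1).map (fun r =>
          ((t.map (fun ia => (PySem.Int.mod ia.1 40, ia.2))).count (r, v r) : Int)
          + (if r = PySem.Int.mod x.1 40 then (if x.2 = v r then 1 else 0) else 0))) := by
      apply List.map_congr_left
      intro r _
      exact hsplit r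
    rw [hmapeq, PySem.List.sum_map_add_int, ih,
        sum_ite_eq_single _ hnd _ hkey (fun r => if x.2 = v r then 1 else 0)]
    rw [List.countP_cons]
    push_cast
    by_cases h2 : x.2 = v (PySem.Int.mod x.1 40) <;> simp [h2]

-- looking up the period-40 table at i mod 40 is looking up p at i mod len(p)
lemma table_getD (p : List Int) (hp : p ≠ []) (hd : p.length ∣ 40) (i : Int) :
    PySem.List.pyGetD (PySem.List.pyRepeat p (PySem.Int.floordiv 40 (p.length : Int)))
      (PySem.Int.mod i 40) 0
    = PySem.List.pyGetD p (PySem.Int.mod i (p.length : Int)) 0 := by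
  have hL : 0 < p.length := List.length_pos_iff.mpr hp
  set L := p.length with hLdef
  have h0 : 0 ≤ PySem.Int.mod i 40 := PySem.Int.mod_nonneg _ (by norm_num)
  have h40 : PySem.Int.mod i 40 < 40 := PySem.Int.mod_lt _ (by norm_num)
  obtain ⟨k, hk⟩ : ∃ k : Nat, PySem.Int.mod i 40 = (k : Int) :=
    ⟨(PySem.Int.mod i 40).toNat, (Int.toNat_of_nonneg h0).symm⟩
  have hk40 : k < 40 := by exact_mod_cast hk ▸ h40
  have hfd : PySem.Int.floordiv 40 (L : Int) = ((40 / L : Nat) : Int) := by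
    have := PySem.Int.floordiv_natCast 40 L
    exact_mod_cast this
  have hrep : PySem.List.pyRepeat p (((40 / L : Nat)) : Int)
      = (List.replicate (40 / L) p).flatten := by
    simp only [PySem.List.pyRepeat, Int.toNat_natCast]
  have hmm : PySem.Int.mod i (L : Int) = ((k % L : Nat) : Int) := by
    have hdI : (L : Int) ∣ 40 := by exact_mod_cast hd
    have hik : PySem.Int.mod i (L : Int) = PySem.Int.mod (PySem.Int.mod i 40) (L : Int) := by
      show Int.fmod i (L : Int) = Int.fmod (Int.fmod i 40) (L : Int)
      have hLpos : (0:Int) < (L : Int) := by positivity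
      rw [Int.fmod_eq_emod_of_nonneg _ (le_of_lt hLpos), Int.fmod_eq_emod_of_nonneg _ (le_of_lt hLpos)]
      have h40 : Int.fmod i 40 = i % 40 := Int.fmod_eq_emod_of_nonneg i (by norm_num)
      rw [h40]
      exact (Int.emod_emod_of_dvd i hdI).symm
    rw [hik, hk]
    show Int.fmod (k : Int) (L : Int) = ((k % L : Nat) : Int)
    rw [Int.fmod_eq_emod_of_nonneg _ (by positivity)]
    push_cast
    rfl
  rw [hfd, hrep, hk, hmm, PySem.List.pyGetD_natCast, PySem.List.pyGetD_natCast]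
  apply repeat_getD
  rw [Nat.div_mul_cancel hd]
  exact hk40

-- A's counting pass for pattern p equals B's 40 histogram lookups against p's period-40 table
lemma score_match (p : List Int) (hp : p ≠ []) (hd : p.length ∣ 40) (answers : List Int) :
    (PySem.List.pyRange 0 (answers.length : Int) 1).foldl
      (fun acc i =>
        if PySem.List.pyGetD answers i 0
            = PySem.List.pyGetD
                (PySem.List.pyRepeat p
                  (PySem.Int.floordiv (answers.length : Int) (p.length : Int) + 1)) i 0
        then acc + 1 else acc) (0 : Int)
    = ((PySem.List.pyRange 0 40 1).map (fun r =>
        ((PySem.List.enumerate answers 0).foldl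
          (fun d ia =>
            let k : Int × Int := (PySem.Int.mod ia.1 40, ia.2)
            d.insert k (d.getD k 0 + 1)) PySem.Dict.empty).getD
          (r, PySem.List.pyGetD
            (PySem.List.pyRepeat p (PySem.Int.floordiv 40 (p.length : Int))) r 0) 0)).sum := by
  have hhist : (PySem.List.enumerate answers 0).foldl
      (fun d ia =>
        let k : Int × Int := (PySem.Int.mod ia.1 40, ia.2)
        d.insert k (d.getD k 0 + 1)) PySem.Dict.empty
      = PySem.Dict.counter
          ((PySem.List.enumerate answers 0).map (fun ia => (PySem.Int.mod ia.1 40, ia.2))) := by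
    rw [← PySem.Dict.foldl_insert_getD_add_one_eq_counter, List.foldl_map]
  rw [hhist]
  have hlookups : ∀ r : Int,
      (PySem.Dict.counter
        ((PySem.List.enumerate answers 0).map (fun ia => (PySem.Int.mod ia.1 40, ia.2)))).getD
        (r, PySem.List.pyGetD
          (PySem.List.pyRepeat p (PySem.Int.floordiv 40 (p.length : Int))) r 0) 0
      = (((PySem.List.enumerate answers 0).map (fun ia => (PySem.Int.mod ia.1 40, ia.2))).count
          (r, PySem.List.pyGetD
            (PySem.List.pyRepeat p (PySem.Int.floordiv 40 (p.length : Int))) r 0) : Int) := by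
    intro r
    exact PySem.Dict.getD_counter _ _
  rw [List.map_congr_left (fun r _ => hlookups r),
      sum_count_keys (PySem.List.enumerate answers 0)
        (fun r => PySem.List.pyGetD
          (PySem.List.pyRepeat p (PySem.Int.floordiv 40 (p.length : Int))) r 0),
      cnt_eq p hp answers]
  congr 1
  apply List.countP_congr
  intro ia _
  rw [table_getD p hp hd ia.1]

-- with equal 3-element score lists, A's range/index argmax scan equals B's enumerate scan
lemma final_eq (a b c m : Int) :
    (PySem.List.pyRange 0 3 1).foldl
      (fun ans i => if m = PySem.List.pyGetD [a, b, c] i 0 then ans ++ [i + 1] else ans) []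
    = (PySem.List.enumerate [a, b, c] 1).foldl
      (fun ans is => if is.2 = m then ans ++ [is.1] else ans) [] := by
  have hr : PySem.List.pyRange 0 3 1 = [0, 1, 2] := by decide
  have he : PySem.List.enumerate [a, b, c] 1 = [(1, a), (2, b), (3, c)] := by
    norm_num [PySem.List.enumerate_cons, PySem.List.enumerate_nil]
  have g0 : PySem.List.pyGetD [a, b, c] (0 : Int) 0 = a := by
    rw [PySem.List.pyGetD_ofNat']; simp [List.getD]
  have g1 : PySem.List.pyGetD [a, b, c] (1 : Int) 0 = b := by
    rw [PySem.List.pyGetD_ofNat']; simp [List.getD]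
  have g2 : PySem.List.pyGetD [a, b, c] (2 : Int) 0 = c := by
    rw [PySem.List.pyGetD_ofNat']; simp [List.getD]
  have e1 : (m = a) = (a = m) := propext eq_comm
  have e2 : (m = b) = (b = m) := propext eq_comm
  have e3 : (m = c) = (c = m) := propext eq_comm
  rw [hr, he]
  simp only [List.foldl_cons, List.foldl_nil, g0, g1, g2]
  simp only [e1, e2, e3]
  split_ifs <;> norm_num

-- ===== VERDICT (by name: the statement is the Claim_ definition above) =====
theorem solution_spec : Claim_equal_solution := by
  intro answers _
  unfold Spec_solution solution solution_alt
  simp only [List.foldl_cons, List.foldl_nil, List.map_cons, List.map_nil,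
    List.nil_append, List.cons_append, List.length_cons, List.length_nil,
    Nat.reduceAdd, Nat.cast_ofNat]
  have h1 := score_match [1,2,3,4,5] (by simp) (by decide) answers
  have h2 := score_match [2,1,2,3,2,4,2,5] (by simp) (by decide) answers
  have h3 := score_match [3,3,1,1,2,2,4,4,5,5] (by simp) (by decide) answers
  simp only [List.length_cons, List.length_nil, Nat.reduceAdd, Nat.cast_ofNat] at h1 h2 h3
  simp only [h1, h2, h3]
  exact final_eq _ _ _ _
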